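-- pv_equiv track=rewrite | github.com/Ascendral/KlomboAGI | klomboagi/reasoning/arc_lines.py | _draw_diag
-- ===== SOURCE A (Python) =====
-- def _draw_diag(g,bg):
--     R,C=len(g),len(g[0]); r=[row[:] for row in g]
--     for i in range(R):
--         for c in range(C):
--             if g[i][c]!=bg:
--                 color=g[i][c]
--                 for d in range(1,max(R,C)):
--                     for dr,dc in [(-1,-1),(-1,1),(1,-1),(1,1)]:
--                         nr,nc=i+dr*d,c+dc*d
--                         if 0<=nr<R and 0<=nc<C and r[nr][nc]==bg:
--                             r[nr][nc]=color
--     return r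
-- ===== SOURCE B (Python) =====
-- def _draw_diag(g, bg):
--     R, C = len(g), len(g[0])
--     # first (row-major) source on each main diagonal (key i-c) and anti diagonal (key i+c)
--     main, anti = {}, {}
--     for i in range(R):
--         for c in range(C):
--             v = g[i][c]
--             if v != bg:
--                 if i - c not in main:
--                     main[i - c] = (i, c, v)
--                 if i + c not in anti:
--                     anti[i + c] = (i, c, v)
--     out = []
--     for x in range(R):
--         row = list(g[x])
--         for y in range(C):
--             if row[y] == bg:
--                 best = None
--                 for s in (main.get(x - y), anti.get(x + y)):
--                     if s is not None and (best is None or s[:2] < best[:2]):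
--                         best = s
--                 if best is not None:
--                     row[y] = best[2]
--         out.append(row)
--     return out
-- ===== Notes on version B (the rewrite author's own statement) =====
-- stated objective: faster
-- what changed: A paints, for every non-background cell, rays in all four diagonal directions over every distance (re-scanning the grid per source); B makes one row-major pass recording the first source on each main (i-c) and anti (i+c) diagonal in two dicts and a second pass giving every background cell the row-major-earlier of its two diagonals' first sources.
import Mathlib
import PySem

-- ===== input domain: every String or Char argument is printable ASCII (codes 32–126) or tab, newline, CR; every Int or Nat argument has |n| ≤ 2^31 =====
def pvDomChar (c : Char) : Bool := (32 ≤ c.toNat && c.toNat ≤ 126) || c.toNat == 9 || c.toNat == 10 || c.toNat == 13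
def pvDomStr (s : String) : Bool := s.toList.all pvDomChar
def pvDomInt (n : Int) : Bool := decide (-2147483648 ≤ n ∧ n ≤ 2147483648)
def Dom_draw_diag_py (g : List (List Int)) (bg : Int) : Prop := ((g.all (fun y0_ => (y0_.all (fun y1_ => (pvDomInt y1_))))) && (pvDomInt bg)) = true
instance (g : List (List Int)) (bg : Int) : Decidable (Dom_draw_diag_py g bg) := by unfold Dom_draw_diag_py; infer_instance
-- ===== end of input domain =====

-- B replaces A's per-source diagonal ray painting (a scan over all distances for every source cell) by
-- two row-major passes: record the first source on each of the two diagonals through every cell, then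
-- paint each background cell from the earlier (row-major) of its two diagonals' first sources.

-- ===== PORT A =====
-- grid read g[i][c]: the indices at every use are nonnegative and in range under Pre_ (loop bounds and
-- the explicit 0<=nr<R / 0<=nc<C guard), so the defaulted lookup is exact there
def pvGet2 (r : List (List Int)) (i c : Int) : Int :=
  PySem.List.pyGetD (PySem.List.pyGetD r i []) c 0

def pvPaint1 (R C bg color : Int) (r : List (List Int)) (nr nc : Int) : List (List Int) :=
  if 0 ≤ nr ∧ nr < R ∧ 0 ≤ nc ∧ nc < C ∧ pvGet2 r nr nc = bg then
    PySem.List.pySetD r nr (PySem.List.pySetD (PySem.List.pyGetD r nr []) nc color)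
  else r

def draw_diag_py (g : List (List Int)) (bg : Int) : List (List Int) :=
  let R : Int := PySem.List.len g
  let C : Int := PySem.List.len (PySem.List.pyGetD g 0 [])
  let r0 : List (List Int) := g.map (fun row => PySem.List.slice row none none)
  (PySem.List.pyRange 0 R 1).foldl (fun r i =>
    (PySem.List.pyRange 0 C 1).foldl (fun r c =>
      if pvGet2 g i c ≠ bg then
        let color := pvGet2 g i c
        (PySem.List.pyRange 1 (max R C) 1).foldl (fun r d =>
          [((-1:Int), (-1:Int)), (-1, 1), (1, -1), (1, 1)].foldl (fun r dir =>
            pvPaint1 R C bg color r (i + dir.1 * d) (c + dir.2 * d)) r) r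
      else r) r) r0

-- ===== PORT B =====
-- Python tuple comparison s[:2] < best[:2] on (row, col)
def pvLexLt (a b : Int × Int) : Bool := a.1 < b.1 || (a.1 == b.1 && a.2 < b.2)

def pvBetter (s best : Option (Int × Int × Int)) : Option (Int × Int × Int) :=
  match s, best with
  | none, b => b
  | some sv, none => some sv
  | some sv, some bv => if pvLexLt (sv.1, sv.2.1) (bv.1, bv.2.1) then some sv else some bv

def draw_diag_py_alt (g : List (List Int)) (bg : Int) : List (List Int) :=
  let R : Int := PySem.List.len g
  let C : Int := PySem.List.len (PySem.List.pyGetD g 0 [])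
  let dicts :=
    (PySem.List.pyRange 0 R 1).foldl (fun (md : PySem.Dict Int (Int × Int × Int) × PySem.Dict Int (Int × Int × Int)) i =>
      (PySem.List.pyRange 0 C 1).foldl (fun md c =>
        let v := pvGet2 g i c
        if v ≠ bg then
          ((if md.1.contains (i - c) then md.1 else md.1.insert (i - c) (i, c, v)),
           (if md.2.contains (i + c) then md.2 else md.2.insert (i + c) (i, c, v)))
        else md) md) (PySem.Dict.empty, PySem.Dict.empty)
  (PySem.List.pyRange 0 R 1).foldl (fun out x =>
    let row :=
      (PySem.List.pyRange 0 C 1).foldl (fun row y =>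
        if PySem.List.pyGetD row y 0 = bg then
          match pvBetter (dicts.2.get? (x + y)) (pvBetter (dicts.1.get? (x - y)) none) with
          | some s => PySem.List.pySetD row y s.2.2
          | none => row
        else row) (PySem.List.pyGetD g x [])
    out ++ [row]) []

-- ===== PRECONDITION & SPEC =====
-- Pre_ excludes exactly the inputs on which A raises IndexError: the empty grid (the read g[0]) and
-- grids where some row is shorter than row 0 (the reads g[i][c] / r[nr][nc] for c < len(g[0])).
def Pre_draw_diag_py (g : List (List Int)) (bg : Int) : Prop :=
  g ≠ [] ∧ ∀ row ∈ g, (g.headD []).length ≤ row.length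
instance (g : List (List Int)) (bg : Int) : Decidable (Pre_draw_diag_py g bg) := by
  unfold Pre_draw_diag_py; infer_instance

def pvWitness_draw_diag_py : List (List Int) × Int := ([[1, 0], [0, 2]], 0)

def Spec_draw_diag_py (g : List (List Int)) (bg : Int) (out : List (List Int)) : Prop :=
  out = draw_diag_py_alt g bg
instance (g : List (List Int)) (bg : Int) (out : List (List Int)) : Decidable (Spec_draw_diag_py g bg out) := by
  unfold Spec_draw_diag_py; infer_instance

-- ===== CLAIM (what is proved, stated in full; the proofs are below) =====
def Claim_equal_draw_diag_py : Prop := ∀ (g : List (List Int)) (bg : Int), Dom_draw_diag_py g bg → Pre_draw_diag_py g bg → Spec_draw_diag_py g bg (draw_diag_py g bg)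

-- ===== LEMMAS AND PROOFS =====
theorem pvGet2_nonneg (r : List (List Int)) {x y : Int} (hx : 0 ≤ x) (hy : 0 ≤ y) :
    pvGet2 r x y = (r.getD x.toNat []).getD y.toNat 0 := by
  obtain ⟨n, rfl⟩ : ∃ n : Nat, x = (n : Int) := ⟨x.toNat, (Int.toNat_of_nonneg hx).symm⟩
  obtain ⟨m, rfl⟩ : ∃ m : Nat, y = (m : Int) := ⟨y.toNat, (Int.toNat_of_nonneg hy).symm⟩
  unfold pvGet2
  rw [PySem.List.pyGetD_natCast, PySem.List.pyGetD_natCast]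
  simp

theorem pvPaint1_shape (R C bg color : Int) (r : List (List Int)) (nr nc : Int) :
    (pvPaint1 R C bg color r nr nc).map List.length = r.map List.length := by
  unfold pvPaint1
  split
  · rename_i h
    obtain ⟨h1, h2, h3, h4, h5⟩ := h
    rw [PySem.List.pySetD_of_nonneg _ _ h1, PySem.List.pySetD_of_nonneg _ _ h3]
    by_cases hn : nr.toNat < r.length
    · have hg : PySem.List.pyGetD r nr [] = r[nr.toNat] :=
        PySem.List.pyGetD_eq_getElem r [] h1 (by omega)
      rw [hg, List.map_set]
      have h2' : ((r[nr.toNat].set nc.toNat color).length) = (r.map List.length)[nr.toNat]'(by simpa) := by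
        simp
      rw [h2', List.set_getElem_self]
    · rw [List.set_eq_of_length_le (by omega)]
  · rfl

theorem pvGet2_paint1 (R C bg color : Int) (r : List (List Int)) (nr nc x y : Int)
    (hC : ∀ (k : Nat), k < r.length → C ≤ ((r.getD k []).length : Int))
    (hx : 0 ≤ x) (hy : 0 ≤ y)
    (hR : (r.length : Int) = R) :
    pvGet2 (pvPaint1 R C bg color r nr nc) x y =
      if x = nr ∧ y = nc ∧ 0 ≤ nr ∧ nr < R ∧ 0 ≤ nc ∧ nc < C ∧ pvGet2 r nr nc = bg then color
      else pvGet2 r x y := by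
  unfold pvPaint1
  by_cases hg : 0 ≤ nr ∧ nr < R ∧ 0 ≤ nc ∧ nc < C ∧ pvGet2 r nr nc = bg
  · rw [if_pos hg]
    obtain ⟨g1, g2, g3, g4, g5⟩ := hg
    have hnr : nr.toNat < r.length := by omega
    have hrow : PySem.List.pyGetD r nr [] = r.getD nr.toNat [] := by
      obtain ⟨n, hn⟩ : ∃ n : Nat, nr = (n : Int) := ⟨nr.toNat, (Int.toNat_of_nonneg g1).symm⟩
      rw [hn, PySem.List.pyGetD_natCast]; simp
    have hrl : C ≤ ((r.getD nr.toNat []).length : Int) := hC _ hnr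
    rw [PySem.List.pySetD_of_nonneg _ _ g1, PySem.List.pySetD_of_nonneg _ _ g3, hrow]
    rw [pvGet2_nonneg _ hx hy, pvGet2_nonneg _ hx hy]
    by_cases hxn : x = nr
    · subst hxn
      have hgetrow : (r.set x.toNat ((r.getD x.toNat []).set nc.toNat color)).getD x.toNat []
          = (r.getD x.toNat []).set nc.toNat color := by
        rw [List.getD_eq_getElem?_getD, List.getElem?_set_self (by omega)]
        simp
      rw [hgetrow]
      by_cases hyn : y = nc
      · subst hyn
        rw [if_pos ⟨rfl, rfl, g1, g2, g3, g4, g5⟩]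
        rw [List.getD_eq_getElem?_getD, List.getElem?_set_self (by omega), Option.getD_some]
      · rw [if_neg (by tauto)]
        rw [List.getD_eq_getElem?_getD, List.getElem?_set_ne (by omega), ← List.getD_eq_getElem?_getD]
    · rw [if_neg (by tauto)]
      have : (r.set nr.toNat ((r.getD nr.toNat []).set nc.toNat color)).getD x.toNat []
          = r.getD x.toNat [] := by
        rw [List.getD_eq_getElem?_getD, List.getElem?_set_ne (by omega), ← List.getD_eq_getElem?_getD]
      rw [this]
  · rw [if_neg hg, if_neg (by tauto)]

theorem pvShape_len {r' r : List (List Int)} (h : r'.map List.length = r.map List.length) :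
    r'.length = r.length := by
  have := congrArg List.length h; simpa using this

theorem pvShape_row {r' r : List (List Int)} (h : r'.map List.length = r.map List.length)
    (k : Nat) : (r'.getD k []).length = (r.getD k []).length := by
  have h1 : (r'.map List.length).getD k 0 = (r.map List.length).getD k 0 := by rw [h]
  simp only [List.getD_eq_getElem?_getD, List.getElem?_map] at h1
  cases e1 : r'[k]? <;> cases e2 : r[k]? <;> simp_all

def pvPaintList (R C bg color : Int) (r : List (List Int)) (ts : List (Int × Int)) : List (List Int) :=
  ts.foldl (fun r t => pvPaint1 R C bg color r t.1 t.2) r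

theorem pvPaintList_shape (R C bg color : Int) (ts : List (Int × Int)) (r : List (List Int)) :
    (pvPaintList R C bg color r ts).map List.length = r.map List.length := by
  induction ts generalizing r with
  | nil => rfl
  | cons t ts ih => rw [pvPaintList, List.foldl_cons, ← pvPaintList, ih, pvPaint1_shape]

theorem pvGet2_paintList (R C bg color : Int) (ts : List (Int × Int)) (r : List (List Int))
    (x y : Int) (hcol : color ≠ bg)
    (hR : (r.length : Int) = R)
    (hC : ∀ (k : Nat), k < r.length → C ≤ ((r.getD k []).length : Int))
    (hx : 0 ≤ x) (hy : 0 ≤ y) :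
    pvGet2 (pvPaintList R C bg color r ts) x y =
      if (x, y) ∈ ts ∧ x < R ∧ y < C ∧ pvGet2 r x y = bg then color else pvGet2 r x y := by
  induction ts generalizing r with
  | nil => simp [pvPaintList]
  | cons t ts ih =>
    rw [pvPaintList, List.foldl_cons, ← pvPaintList]
    have hsh := pvPaint1_shape R C bg color r t.1 t.2
    have hR' : ((pvPaint1 R C bg color r t.1 t.2).length : Int) = R := by
      rw [pvShape_len hsh]; exact hR
    have hC' : ∀ (k : Nat), k < (pvPaint1 R C bg color r t.1 t.2).length →
        C ≤ (((pvPaint1 R C bg color r t.1 t.2).getD k []).length : Int) := by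
      intro k hk
      rw [pvShape_row hsh]
      exact hC k (by rw [← pvShape_len hsh]; exact hk)
    rw [ih _ hR' hC']
    have hstep := pvGet2_paint1 R C bg color r t.1 t.2 x y hC hx hy hR
    by_cases hc : x < R ∧ y < C ∧ pvGet2 r x y = bg
    · by_cases hm : (x, y) = t
      · have hxy : x = t.1 ∧ y = t.2 := by
          constructor <;> (rw [← hm])
        have hcond : x = t.1 ∧ y = t.2 ∧ 0 ≤ t.1 ∧ t.1 < R ∧ 0 ≤ t.2 ∧ t.2 < C ∧ pvGet2 r t.1 t.2 = bg := by
          refine ⟨hxy.1, hxy.2, ?_, ?_, ?_, ?_, ?_⟩ <;>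
            (first | (rw [← hxy.1]; try rw [← hxy.2]) | (rw [← hxy.2])) <;> tauto
        rw [if_pos hcond] at hstep
        rw [hstep]
        rw [if_neg (by intro h; exact hcol h.2.2.2), if_pos ⟨by simp [← hm], hc⟩]
      · have hne : ¬(x = t.1 ∧ y = t.2 ∧ 0 ≤ t.1 ∧ t.1 < R ∧ 0 ≤ t.2 ∧ t.2 < C ∧ pvGet2 r t.1 t.2 = bg) := by
          intro h; exact hm (by ext <;> simp [h.1, h.2.1])
        rw [if_neg hne] at hstep
        rw [hstep]
        have hmem : ((x, y) ∈ t :: ts) ↔ ((x, y) ∈ ts) := by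
          simp [List.mem_cons, hm]
        by_cases hin : (x, y) ∈ ts
        · rw [if_pos ⟨hin, hc⟩, if_pos ⟨List.mem_cons_of_mem t hin, hc⟩]
        · rw [if_neg (by tauto), if_neg (by rw [hmem]; tauto)]
    · have hna : ¬(x = t.1 ∧ y = t.2 ∧ 0 ≤ t.1 ∧ t.1 < R ∧ 0 ≤ t.2 ∧ t.2 < C ∧ pvGet2 r t.1 t.2 = bg) := by
        intro h
        obtain ⟨e1, e2, _, h4, _, h6, h7⟩ := h
        exact hc ⟨e1 ▸ h4, e2 ▸ h6, by rw [e1, e2]; exact h7⟩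
      rw [if_neg hna] at hstep
      rw [hstep, if_neg (by tauto), if_neg (by tauto)]

def pvTargets (i c M : Int) : List (Int × Int) :=
  (PySem.List.pyRange 1 M 1).flatMap (fun d => [(i - d, c - d), (i - d, c + d), (i + d, c - d), (i + d, c + d)])

theorem pvTargets_mem (i c M x y : Int) (hx : 0 ≤ x) (hi : 0 ≤ i) (hxM : x < M) (hiM : i < M) :
    ((x, y) ∈ pvTargets i c M) ↔ (x ≠ i ∧ (x - i = y - c ∨ x - i = c - y)) := by
  simp only [pvTargets, List.mem_flatMap, PySem.List.mem_pyRange_one, List.mem_cons,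
    List.not_mem_nil, or_false, Prod.mk.injEq]
  constructor
  · rintro ⟨d, ⟨hd1, hd2⟩, h⟩
    omega
  · rintro ⟨hne, hd⟩
    refine ⟨if x < i then i - x else x - i, by omega, ?_⟩
    by_cases hlt : x < i <;> simp [hlt] <;> omega

def pvPaintSrc (g : List (List Int)) (bg R C : Int) (r : List (List Int)) (t : Int × Int) : List (List Int) :=
  pvPaintList R C bg (pvGet2 g t.1 t.2) r (pvTargets t.1 t.2 (max R C))

theorem pvFoldSrcs_shape (g : List (List Int)) (bg R C : Int) (l : List (Int × Int)) (r : List (List Int)) :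
    ((l.foldl (pvPaintSrc g bg R C) r).map List.length) = r.map List.length := by
  induction l generalizing r with
  | nil => rfl
  | cons t l ih => rw [List.foldl_cons, ih, pvPaintSrc, pvPaintList_shape]

theorem pvGet2_foldSrcs (g : List (List Int)) (bg R C : Int) (l : List (Int × Int))
    (hl : ∀ t ∈ l, 0 ≤ t.1 ∧ t.1 < R ∧ 0 ≤ t.2 ∧ t.2 < C ∧ pvGet2 g t.1 t.2 ≠ bg)
    (r : List (List Int)) (hR : (r.length : Int) = R)
    (hC : ∀ (k : Nat), k < r.length → C ≤ ((r.getD k []).length : Int))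
    (x y : Int) (hx : 0 ≤ x) (hx2 : x < R) (hy : 0 ≤ y) (hy2 : y < C) :
    pvGet2 (l.foldl (pvPaintSrc g bg R C) r) x y =
      if pvGet2 r x y = bg then
        (match l.find? (fun t => decide (t.1 ≠ x ∧ (x - t.1 = y - t.2 ∨ x - t.1 = t.2 - y))) with
         | some t => pvGet2 g t.1 t.2
         | none => bg)
      else pvGet2 r x y := by
  induction l generalizing r with
  | nil =>
    simp only [List.foldl_nil, List.find?_nil]
    split <;> simp_all
  | cons t l ih =>
    rw [List.foldl_cons]
    have ht := hl t (List.mem_cons_self)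
    have hsh := pvPaintList_shape R C bg (pvGet2 g t.1 t.2) (pvTargets t.1 t.2 (max R C)) r
    have hR' : (((pvPaintSrc g bg R C r t).length : Int)) = R := by
      rw [pvPaintSrc, pvShape_len hsh]; exact hR
    have hC' : ∀ (k : Nat), k < (pvPaintSrc g bg R C r t).length →
        C ≤ (((pvPaintSrc g bg R C r t).getD k []).length : Int) := by
      intro k hk
      rw [pvPaintSrc, pvShape_row hsh]
      exact hC k (by rw [← pvShape_len hsh]; exact hk)
    rw [ih (fun s hs => hl s (List.mem_cons_of_mem t hs)) _ hR' hC']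
    have hstep := pvGet2_paintList R C bg (pvGet2 g t.1 t.2) (pvTargets t.1 t.2 (max R C)) r x y
      ht.2.2.2.2 hR hC hx hy
    have hmem : ((x, y) ∈ pvTargets t.1 t.2 (max R C)) ↔
        (x ≠ t.1 ∧ (x - t.1 = y - t.2 ∨ x - t.1 = t.2 - y)) :=
      pvTargets_mem t.1 t.2 (max R C) x y hx ht.1 (by omega) (by omega)
    by_cases hbg : pvGet2 r x y = bg
    · rw [if_pos hbg]
      by_cases hp : t.1 ≠ x ∧ (x - t.1 = y - t.2 ∨ x - t.1 = t.2 - y)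
      · have : pvGet2 (pvPaintSrc g bg R C r t) x y = pvGet2 g t.1 t.2 := by
          rw [pvPaintSrc, hstep, if_pos ⟨hmem.2 ⟨fun h => hp.1 h.symm, hp.2⟩, hx2, hy2, hbg⟩]
        rw [this, if_neg ht.2.2.2.2, List.find?_cons_of_pos (by simpa using hp)]
      · have : pvGet2 (pvPaintSrc g bg R C r t) x y = pvGet2 r x y := by
          rw [pvPaintSrc, hstep, if_neg]
          intro h
          exact hp ⟨fun he => (hmem.1 h.1).1 he.symm, (hmem.1 h.1).2⟩
        rw [this, if_pos hbg, List.find?_cons_of_neg (by simpa using hp)]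
    · have : pvGet2 (pvPaintSrc g bg R C r t) x y = pvGet2 r x y := by
        rw [pvPaintSrc, hstep, if_neg (by tauto)]
      rw [this, if_neg hbg, if_neg hbg]

theorem pvGet2_foldSrcs_right (g : List (List Int)) (bg R C : Int) (l : List (Int × Int))
    (hl : ∀ t ∈ l, pvGet2 g t.1 t.2 ≠ bg)
    (r : List (List Int)) (hR : (r.length : Int) = R)
    (hC : ∀ (k : Nat), k < r.length → C ≤ ((r.getD k []).length : Int))
    (x y : Int) (hx : 0 ≤ x) (hy : 0 ≤ y) (hy2 : C ≤ y) :
    pvGet2 (l.foldl (pvPaintSrc g bg R C) r) x y = pvGet2 r x y := by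
  induction l generalizing r with
  | nil => rfl
  | cons t l ih =>
    rw [List.foldl_cons]
    have hsh := pvPaintList_shape R C bg (pvGet2 g t.1 t.2) (pvTargets t.1 t.2 (max R C)) r
    have hR' : (((pvPaintSrc g bg R C r t).length : Int)) = R := by
      rw [pvPaintSrc, pvShape_len hsh]; exact hR
    have hC' : ∀ (k : Nat), k < (pvPaintSrc g bg R C r t).length →
        C ≤ (((pvPaintSrc g bg R C r t).getD k []).length : Int) := by
      intro k hk
      rw [pvPaintSrc, pvShape_row hsh]
      exact hC k (by rw [← pvShape_len hsh]; exact hk)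
    rw [ih (fun s hs => hl s (List.mem_cons_of_mem t hs)) _ hR' hC', pvPaintSrc,
      pvGet2_paintList R C bg (pvGet2 g t.1 t.2) (pvTargets t.1 t.2 (max R C)) r x y ?_ hR hC hx hy]
    · rw [if_neg (by omega)]
    · exact hl t (List.mem_cons_self)

def pvCells (R C : Int) : List (Int × Int) :=
  (PySem.List.pyRange 0 R 1).flatMap (fun i => (PySem.List.pyRange 0 C 1).map (fun c => (i, c)))

def pvSrcs (g : List (List Int)) (bg R C : Int) : List (Int × Int) :=
  (pvCells R C).filter (fun t => decide (pvGet2 g t.1 t.2 ≠ bg))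

theorem pvMem_cells (R C : Int) (t : Int × Int) :
    t ∈ pvCells R C ↔ 0 ≤ t.1 ∧ t.1 < R ∧ 0 ≤ t.2 ∧ t.2 < C := by
  obtain ⟨a, b⟩ := t
  simp [pvCells, List.mem_flatMap, PySem.List.mem_pyRange_one, and_assoc]

theorem pvA_eq_fold (g : List (List Int)) (bg : Int) :
    draw_diag_py g bg =
      (pvSrcs g bg (g.length : Int) ((PySem.List.pyGetD g 0 []).length : Int)).foldl
        (pvPaintSrc g bg (g.length : Int) ((PySem.List.pyGetD g 0 []).length : Int)) g := by
  set R : Int := (g.length : Int) with hRdef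
  set C : Int := ((PySem.List.pyGetD g 0 []).length : Int) with hCdef
  have hr0 : g.map (fun row => PySem.List.slice row none none) = g := by
    simp [PySem.List.slice_none_none]
  have hinner : ∀ (r : List (List Int)) (t : Int × Int),
      (PySem.List.pyRange 1 (max R C) 1).foldl (fun r d =>
        [((-1:Int), (-1:Int)), (-1, 1), (1, -1), (1, 1)].foldl (fun r dir =>
          pvPaint1 R C bg (pvGet2 g t.1 t.2) r (t.1 + dir.1 * d) (t.2 + dir.2 * d)) r) r
      = pvPaintSrc g bg R C r t := by
    intro r t
    rw [pvPaintSrc, pvPaintList, pvTargets, List.foldl_flatMap]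
    apply PySem.List.foldl_congr_mem
    intro acc d _
    simp [List.foldl_cons]
    ring_nf
  calc draw_diag_py g bg
      = (PySem.List.pyRange 0 R 1).foldl (fun r i =>
          (PySem.List.pyRange 0 C 1).foldl (fun r c =>
            if pvGet2 g i c ≠ bg then pvPaintSrc g bg R C r (i, c) else r) r) g := by
        rw [draw_diag_py]
        simp only [PySem.List.len_eq, ← hRdef, ← hCdef, hr0]
        apply PySem.List.foldl_congr_mem
        intro acc i _
        apply PySem.List.foldl_congr_mem
        intro acc2 c _
        split
        · exact hinner acc2 (i, c)
        · rfl
    _ = (pvCells R C).foldl (fun r t =>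
          if pvGet2 g t.1 t.2 ≠ bg then pvPaintSrc g bg R C r t else r) g := by
        rw [pvCells, List.foldl_flatMap]
        apply PySem.List.foldl_congr_mem
        intro acc i _
        rw [List.foldl_map]
    _ = (pvSrcs g bg R C).foldl (pvPaintSrc g bg R C) g := by
        rw [pvSrcs, PySem.List.foldl_ite_eq_foldl_filter]

def pvLex (s t : Int × Int) : Prop := s.1 < t.1 ∨ (s.1 = t.1 ∧ s.2 < t.2)

theorem pvLexLt_of_lex {a b : Int × Int} (h : pvLex a b) : pvLexLt a b = true := by
  simp only [pvLexLt, pvLex] at *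
  simp
  omega

theorem pvLexLt_of_lex_rev {a b : Int × Int} (h : pvLex a b) : pvLexLt b a = false := by
  simp only [pvLexLt, pvLex] at *
  simp
  omega

theorem pvCells_pairwise (R C : Int) : (pvCells R C).Pairwise pvLex := by
  rw [pvCells, List.pairwise_flatMap]
  constructor
  · intro a _
    rw [List.pairwise_map]
    exact (PySem.List.pairwise_lt_pyRange_one 0 C).imp (fun h => Or.inr ⟨rfl, h⟩)
  · exact (PySem.List.pairwise_lt_pyRange_one 0 R).imp (by
      intro i j hij a ha b hb
      simp only [List.mem_map] at ha hb
      obtain ⟨c1, _, rfl⟩ := ha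
      obtain ⟨c2, _, rfl⟩ := hb
      exact Or.inl hij)

theorem pvBetter_find (l : List (Int × Int)) (hl : l.Pairwise pvLex)
    (f : Int × Int → Int × Int × Int) (hf : ∀ t, ((f t).1, (f t).2.1) = t)
    (p q : Int × Int → Bool) :
    pvBetter ((l.find? q).map f) (pvBetter ((l.find? p).map f) none) =
      (l.find? (fun t => p t || q t)).map f := by
  induction l with
  | nil => simp [pvBetter]
  | cons a l ih =>
    have ha : ∀ b ∈ l, pvLex a b := fun b hb => List.rel_of_pairwise_cons hl hb
    by_cases pa : p a = true
    · rw [List.find?_cons_of_pos (p := p) pa,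
        List.find?_cons_of_pos (p := fun t => p t || q t) (by simp [pa])]
      by_cases qa : q a = true
      · rw [List.find?_cons_of_pos (p := q) qa]
        simp only [Option.map_some, pvBetter, hf]
        split <;> rfl
      · rw [List.find?_cons_of_neg (p := q) qa]
        cases hq : l.find? q with
        | none => simp [pvBetter]
        | some b =>
          have hab : pvLex a b := ha b (List.mem_of_find?_eq_some hq)
          simp only [Option.map_some, pvBetter, hf]
          rw [if_neg (by rw [pvLexLt_of_lex_rev hab]; simp)]
    · by_cases qa : q a = true
      · rw [List.find?_cons_of_pos (p := q) qa,
          List.find?_cons_of_pos (p := fun t => p t || q t) (by simp [qa]),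
          List.find?_cons_of_neg (p := p) pa]
        cases hp : l.find? p with
        | none => simp [pvBetter]
        | some b =>
          have hab : pvLex a b := ha b (List.mem_of_find?_eq_some hp)
          simp only [Option.map_some, pvBetter, hf]
          rw [if_pos (pvLexLt_of_lex hab)]
      · rw [List.find?_cons_of_neg (p := p) pa, List.find?_cons_of_neg (p := q) qa,
          List.find?_cons_of_neg (p := fun t => p t || q t) (by simp [pa, qa])]
        exact ih (List.Pairwise.of_cons hl)

theorem pvDict_first (g : List (List Int)) (bg : Int) (key : Int × Int → Int)
    (l : List (Int × Int)) (d : PySem.Dict Int (Int × Int × Int)) (k : Int) :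
    (l.foldl (fun d t =>
        if pvGet2 g t.1 t.2 ≠ bg then
          (if d.contains (key t) then d else d.insert (key t) (t.1, t.2, pvGet2 g t.1 t.2))
        else d) d).get? k
      = (d.get? k).or
          (((l.filter (fun t => decide (pvGet2 g t.1 t.2 ≠ bg) && (key t == k))).head?).map
            (fun t => (t.1, t.2, pvGet2 g t.1 t.2))) := by
  induction l generalizing d with
  | nil => simp
  | cons t l ih =>
    rw [List.foldl_cons]
    by_cases hv : pvGet2 g t.1 t.2 ≠ bg
    · rw [if_pos hv]
      by_cases hk : key t = k
      · rw [List.filter_cons_of_pos (by simp [hv, hk]), List.head?_cons, Option.map_some]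
        by_cases hc : d.contains (key t) = true
        · rw [if_pos hc, ih]
          have hsome : (d.get? k).isSome := by
            rw [← hk, ← PySem.Dict.contains_eq_isSome_get?]; exact hc
          obtain ⟨v, hvv⟩ := Option.isSome_iff_exists.mp hsome
          rw [hvv, Option.some_or, Option.some_or]
        · rw [if_neg hc, ih]
          have hnone : d.get? k = none := by
            rw [← hk]
            have := PySem.Dict.contains_eq_isSome_get? d (key t)
            rw [Bool.not_eq_true] at hc
            cases hvv : d.get? (key t) with
            | none => rfl
            | some v => rw [hvv] at this; rw [this] at hc; simp at hc
          have : (d.insert (key t) (t.1, t.2, pvGet2 g t.1 t.2)).get? k = some (t.1, t.2, pvGet2 g t.1 t.2) := by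
            rw [PySem.Dict.get?_insert, if_pos hk.symm]
          rw [this, Option.some_or, hnone, Option.none_or]
      · rw [List.filter_cons_of_neg (by simp [hk]), ih]
        by_cases hc : d.contains (key t) = true
        · rw [if_pos hc]
        · rw [if_neg hc, PySem.Dict.get?_insert, if_neg (fun h => hk h.symm)]
    · rw [if_neg hv, ih, List.filter_cons_of_neg (by simp [hv])]

theorem pvRow_fold (best : Int → Option (Int × Int × Int)) (bg : Int) (row0 : List Int)
    (n : Nat) (m : Nat) :
    ((PySem.List.pyRange 0 (n : Int) 1).foldl (fun row y =>
        if PySem.List.pyGetD row y 0 = bg then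
          match best y with
          | some s => PySem.List.pySetD row y s.2.2
          | none => row
        else row) row0)[m]?
    = if m < n then
        (row0[m]?).map (fun v => if v = bg then
          (match best (m : Int) with | some s => s.2.2 | none => v) else v)
      else row0[m]? := by
  induction n generalizing m with
  | zero => rw [PySem.List.pyRange_one_eq_nil (by omega)]; simp
  | succ n ih =>
    rw [show ((n + 1 : Nat) : Int) = (n : Int) + 1 by push_cast; ring,
      PySem.List.pyRange_one_succ_right (by omega), List.foldl_append, List.foldl_cons,
      List.foldl_nil]
    set F := (PySem.List.pyRange 0 (n : Int) 1).foldl (fun row y =>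
        if PySem.List.pyGetD row y 0 = bg then
          match best y with
          | some s => PySem.List.pySetD row y s.2.2
          | none => row
        else row) row0 with hFdef
    have hFn : F[n]? = row0[n]? := by rw [ih n, if_neg (by omega)]
    by_cases hm : m = n
    · subst hm
      cases hrv : row0[m]? with
      | none =>
        have hFm : F[m]? = none := by rw [hFn, hrv]
        have hlen : F.length ≤ m := by simpa [List.getElem?_eq_none_iff] using hFm
        conv_rhs => rw [if_pos (show m < m + 1 by omega)]
        rw [Option.map_none]
        have hsetnone : ∀ v : Int, (PySem.List.pySetD F ((m : Nat) : Int) v)[m]? = none := by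
          intro v
          rw [PySem.List.pySetD_of_nonneg _ _ (by positivity)]
          simp [hlen]
        split
        · split
          · exact hsetnone _
          · exact hFm
        · exact hFm
      | some v =>
        have hFm : F[m]? = some v := by rw [hFn, hrv]
        obtain ⟨hlt, -⟩ := List.getElem?_eq_some_iff.mp hFm
        have hcond : PySem.List.pyGetD F ((m : Nat) : Int) 0 = v := by
          rw [PySem.List.pyGetD_natCast, List.getD_eq_getElem?_getD, hFm]; rfl
        conv_rhs => rw [if_pos (show m < m + 1 by omega)]
        rw [Option.map_some, hcond]
        by_cases hvb : v = bg
        · rw [if_pos hvb]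
          cases hbv : best ((m : Nat) : Int) with
          | none => simp [hvb, hFm]
          | some s =>
            dsimp only
            rw [PySem.List.pySetD_of_nonneg _ _ (by omega)]
            simp only [Int.toNat_natCast]
            rw [List.getElem?_set_self hlt]
            simp [hvb]
        · rw [if_neg hvb, hFm]
          simp [hvb]
    · have hres : (if PySem.List.pyGetD F ((n : Nat) : Int) 0 = bg then
          match best ((n : Nat) : Int) with
          | some s => PySem.List.pySetD F ((n : Nat) : Int) s.2.2
          | none => F
        else F)[m]? = F[m]? := by
        split
        · split
          · rw [PySem.List.pySetD_of_nonneg _ _ (by positivity)]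
            simp only [Int.toNat_natCast]
            rw [List.getElem?_set_ne (by omega)]
          · rfl
        · rfl
      rw [hres, ih m]
      by_cases hmn : m < n
      · rw [if_pos hmn, if_pos (by omega)]
      · rw [if_neg hmn, if_neg (by omega)]

def pvF (g : List (List Int)) : Int × Int → Int × Int × Int := fun t => (t.1, t.2, pvGet2 g t.1 t.2)

def pvBest (g : List (List Int)) (bg R C x y : Int) : Option (Int × Int × Int) :=
  ((pvCells R C).find? (fun t =>
    (decide (pvGet2 g t.1 t.2 ≠ bg) && (t.1 - t.2 == x - y)) ||
    (decide (pvGet2 g t.1 t.2 ≠ bg) && (t.1 + t.2 == x + y)))).map (pvF g)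

theorem pvB_char (g : List (List Int)) (bg : Int) :
    draw_diag_py_alt g bg =
      (PySem.List.pyRange 0 (g.length : Int) 1).map (fun x =>
        (PySem.List.pyRange 0 ((PySem.List.pyGetD g 0 []).length : Int) 1).foldl (fun row y =>
          if PySem.List.pyGetD row y 0 = bg then
            match pvBest g bg (g.length : Int) ((PySem.List.pyGetD g 0 []).length : Int) x y with
            | some s => PySem.List.pySetD row y s.2.2
            | none => row
          else row) (PySem.List.pyGetD g x [])) := by
  set R : Int := (g.length : Int) with hRdef
  set C : Int := ((PySem.List.pyGetD g 0 []).length : Int) with hCdef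
  -- the dictionary pair, flattened to a fold over the cell list and split into two folds
  have hdicts :
      ((PySem.List.pyRange 0 R 1).foldl (fun (md : PySem.Dict Int (Int × Int × Int) × PySem.Dict Int (Int × Int × Int)) i =>
        (PySem.List.pyRange 0 C 1).foldl (fun md c =>
          let v := pvGet2 g i c
          if v ≠ bg then
            ((if md.1.contains (i - c) then md.1 else md.1.insert (i - c) (i, c, v)),
             (if md.2.contains (i + c) then md.2 else md.2.insert (i + c) (i, c, v)))
          else md) md) (PySem.Dict.empty, PySem.Dict.empty))
      = ((pvCells R C).foldl (fun d t =>
            if pvGet2 g t.1 t.2 ≠ bg then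
              (if d.contains (t.1 - t.2) then d else d.insert (t.1 - t.2) (t.1, t.2, pvGet2 g t.1 t.2))
            else d) PySem.Dict.empty,
         (pvCells R C).foldl (fun d t =>
            if pvGet2 g t.1 t.2 ≠ bg then
              (if d.contains (t.1 + t.2) then d else d.insert (t.1 + t.2) (t.1, t.2, pvGet2 g t.1 t.2))
            else d) PySem.Dict.empty) := by
    rw [← PySem.List.foldl_prod_mk
      (f := fun d (t : Int × Int) =>
        if pvGet2 g t.1 t.2 ≠ bg then
          (if PySem.Dict.contains d (t.1 - t.2) then d else d.insert (t.1 - t.2) (t.1, t.2, pvGet2 g t.1 t.2))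
        else d)
      (g := fun d (t : Int × Int) =>
        if pvGet2 g t.1 t.2 ≠ bg then
          (if PySem.Dict.contains d (t.1 + t.2) then d else d.insert (t.1 + t.2) (t.1, t.2, pvGet2 g t.1 t.2))
        else d)]
    rw [pvCells, List.foldl_flatMap]
    apply PySem.List.foldl_congr_mem
    intro acc i _
    rw [List.foldl_map]
    apply PySem.List.foldl_congr_mem
    intro md c _
    by_cases hv : pvGet2 g i c ≠ bg
    · simp only [if_pos hv]
    · simp only [if_neg hv]
  rw [draw_diag_py_alt]
  simp only [PySem.List.len_eq, ← hRdef, ← hCdef, hdicts]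
  rw [PySem.List.foldl_append_singleton_eq_map, List.nil_append]
  apply List.map_congr_left
  intro x _
  apply PySem.List.foldl_congr_mem
  intro row y _
  have hbest :
      pvBetter (((pvCells R C).foldl (fun d t =>
            if pvGet2 g t.1 t.2 ≠ bg then
              (if d.contains (t.1 + t.2) then d else d.insert (t.1 + t.2) (t.1, t.2, pvGet2 g t.1 t.2))
            else d) PySem.Dict.empty).get? (x + y))
        (pvBetter (((pvCells R C).foldl (fun d t =>
            if pvGet2 g t.1 t.2 ≠ bg then
              (if d.contains (t.1 - t.2) then d else d.insert (t.1 - t.2) (t.1, t.2, pvGet2 g t.1 t.2))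
            else d) PySem.Dict.empty).get? (x - y)) none)
      = pvBest g bg R C x y := by
    rw [pvDict_first g bg (fun t => t.1 - t.2), pvDict_first g bg (fun t => t.1 + t.2)]
    rw [PySem.Dict.get?_empty, PySem.Dict.get?_empty, Option.none_or, Option.none_or]
    rw [List.head?_filter, List.head?_filter]
    exact pvBetter_find (pvCells R C) (pvCells_pairwise R C) (pvF g) (fun t => rfl) _ _
  rw [hbest]

theorem pvGet2_natCast (r : List (List Int)) (k m : Nat) :
    pvGet2 r (k : Int) (m : Int) = (r.getD k []).getD m 0 := by
  rw [pvGet2_nonneg r (by positivity) (by positivity)]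
  simp

theorem pv_final (g : List (List Int)) (bg : Int) (hne : g ≠ [])
    (hrows : ∀ row ∈ g, (g.headD []).length ≤ row.length) :
    draw_diag_py g bg = draw_diag_py_alt g bg := by
  set R : Int := (g.length : Int) with hRdef
  set C0 : Nat := (PySem.List.pyGetD g 0 []).length with hC0def
  have hhead : PySem.List.pyGetD g 0 [] = g.headD [] := by
    rw [PySem.List.pyGetD_zero]
    cases g with
    | nil => rfl
    | cons a l => rfl
  have hCle : ∀ (k : Nat), k < g.length → (C0 : Int) ≤ ((g.getD k []).length : Int) := by
    intro k hk
    rw [List.getD_eq_getElem g [] hk]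
    have := hrows (g[k]) (List.getElem_mem hk)
    rw [hC0def, hhead]
    exact_mod_cast this
  have hl : ∀ t ∈ pvSrcs g bg R (C0 : Int),
      0 ≤ t.1 ∧ t.1 < R ∧ 0 ≤ t.2 ∧ t.2 < (C0 : Int) ∧ pvGet2 g t.1 t.2 ≠ bg := by
    intro t ht
    rw [pvSrcs, List.mem_filter] at ht
    have hb := (pvMem_cells R (C0 : Int) t).1 ht.1
    refine ⟨hb.1, hb.2.1, hb.2.2.1, hb.2.2.2, by simpa using ht.2⟩
  have hgR : ((g.length : Int)) = R := rfl
  have hgC : ∀ (k : Nat), k < g.length → (C0 : Int) ≤ ((g.getD k []).length : Int) := hCle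
  have hAfold := pvA_eq_fold g bg
  have hshape : (draw_diag_py g bg).map List.length = g.map List.length := by
    rw [hAfold]; exact pvFoldSrcs_shape g bg R (C0 : Int) _ g
  have lenA : (draw_diag_py g bg).length = g.length := pvShape_len hshape
  have hB := pvB_char g bg
  have lenB : (draw_diag_py_alt g bg).length = g.length := by
    rw [hB, List.length_map, PySem.List.length_pyRange_one]
    simp
  have hgd : ∀ (k : Nat), PySem.List.pyGetD g (k : Int) [] = g.getD k [] := by
    intro k
    rw [PySem.List.pyGetD_natCast]
  apply List.ext_getElem?_iff.mpr
  intro k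
  by_cases hk : k < g.length
  · have hkA : k < (draw_diag_py g bg).length := by omega
    have hkB : k < ((PySem.List.pyRange 0 R 1).map (fun x =>
        (PySem.List.pyRange 0 (C0 : Int) 1).foldl (fun row y =>
          if PySem.List.pyGetD row y 0 = bg then
            match pvBest g bg R (C0 : Int) x y with
            | some s => PySem.List.pySetD row y s.2.2
            | none => row
          else row) (PySem.List.pyGetD g x []))).length := by
      rw [List.length_map, PySem.List.length_pyRange_one]
      simp
      omega
    rw [List.getElem?_eq_getElem hkA, hB, List.getElem?_eq_getElem hkB, List.getElem_map,
      PySem.List.getElem_pyRange_one, Option.some.injEq]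
    rw [show (0 : Int) + (k : Int) = (k : Int) from zero_add _]
    have rowlenA : ((draw_diag_py g bg)[k]'hkA).length = (g.getD k []).length := by
      have h1 : ((draw_diag_py g bg).map List.length)[k]'(by simpa [lenA]) =
          (g.map List.length)[k]'(by simpa) := by congr 1
      simp only [List.getElem_map] at h1
      rw [List.getD_eq_getElem g [] hk]
      exact h1
    apply List.ext_getElem?_iff.mpr
    intro m
    have hBrow := pvRow_fold (fun y => pvBest g bg R (C0 : Int) (k : Int) y) bg
      (PySem.List.pyGetD g (k : Int) []) C0 m
    rw [hBrow, hgd k, List.getD_eq_getElem g [] hk]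
    by_cases hm : m < (g[k]'hk).length
    · have hmA : m < ((draw_diag_py g bg)[k]'hkA).length := by
        rw [rowlenA, List.getD_eq_getElem g [] hk]; exact hm
      rw [List.getElem?_eq_getElem hmA, List.getElem?_eq_getElem hm]
      have hval : ((draw_diag_py g bg)[k]'hkA)[m]'hmA = pvGet2 (draw_diag_py g bg) (k : Int) (m : Int) := by
        rw [pvGet2_natCast, List.getD_eq_getElem _ [] hkA, List.getD_eq_getElem _ 0 hmA]
      have hgval : (g[k]'hk)[m]'hm = pvGet2 g (k : Int) (m : Int) := by
        rw [pvGet2_natCast, List.getD_eq_getElem g [] hk, List.getD_eq_getElem _ 0 hm]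
      by_cases hmC : m < C0
      · -- in-grid column: both sides compute the first diagonal source
        have hA := pvGet2_foldSrcs g bg R (C0 : Int) (pvSrcs g bg R (C0 : Int)) hl g rfl hgC
          (k : Int) (m : Int) (by positivity) (by rw [hRdef]; exact_mod_cast hk) (by positivity)
          (by exact_mod_cast hmC)
        rw [if_pos hmC]
        by_cases hbg : pvGet2 g (k : Int) (m : Int) = bg
        · have hfind : (pvSrcs g bg R (C0 : Int)).find?
              (fun t => decide (t.1 ≠ (k : Int) ∧ ((k : Int) - t.1 = (m : Int) - t.2 ∨ (k : Int) - t.1 = t.2 - (m : Int))))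
              = (pvCells R (C0 : Int)).find? (fun t =>
                (decide (pvGet2 g t.1 t.2 ≠ bg) && (t.1 - t.2 == (k : Int) - (m : Int))) ||
                (decide (pvGet2 g t.1 t.2 ≠ bg) && (t.1 + t.2 == (k : Int) + (m : Int)))) := by
            rw [pvSrcs, ← List.head?_filter, List.filter_filter, ← List.head?_filter]
            congr 1
            apply List.filter_congr
            intro t _
            by_cases hnb : pvGet2 g t.1 t.2 ≠ bg
            · have htne : ¬(t.1 = (k : Int) ∧ t.2 = (m : Int)) := by
                rintro ⟨h1, h2⟩
                exact hnb (by rw [h1, h2]; exact hbg)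
              have hq : decide (pvGet2 g t.1 t.2 ≠ bg) = true := decide_eq_true hnb
              rw [hq, Bool.and_true, Bool.true_and, Bool.true_and]
              have hbeq : (t.1 - t.2 == (k : Int) - (m : Int) || t.1 + t.2 == (k : Int) + (m : Int))
                  = decide (t.1 - t.2 = (k : Int) - (m : Int) ∨ t.1 + t.2 = (k : Int) + (m : Int)) := by
                by_cases h1 : t.1 - t.2 = (k : Int) - (m : Int) <;>
                  by_cases h2 : t.1 + t.2 = (k : Int) + (m : Int) <;> simp [h1, h2]
              rw [hbeq, decide_eq_decide]
              omega
            · simp [hnb]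
          rw [Option.map_some, hval, hAfold, hA, if_pos hbg, hfind, hgval, hbg, if_pos rfl,
            Option.some.injEq, pvBest]
          cases hfo : (pvCells R (C0 : Int)).find? (fun t =>
                (decide (pvGet2 g t.1 t.2 ≠ bg) && (t.1 - t.2 == (k : Int) - (m : Int))) ||
                (decide (pvGet2 g t.1 t.2 ≠ bg) && (t.1 + t.2 == (k : Int) + (m : Int)))) with
          | none => rfl
          | some t => simp [pvF]
        · rw [Option.map_some, hval, hAfold, hA, if_neg hbg, hgval, Option.some.injEq,
            if_neg hbg]
      · -- column beyond row 0's length: both sides keep the original value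
        rw [if_neg hmC, hval, hgval, hAfold,
          pvGet2_foldSrcs_right g bg R (C0 : Int) (pvSrcs g bg R (C0 : Int))
            (fun t ht => (hl t ht).2.2.2.2) g rfl hgC (k : Int) (m : Int)
            (by positivity) (by positivity) (by omega)]
    · have hmA : ¬ m < ((draw_diag_py g bg)[k]'hkA).length := by
        rw [rowlenA, List.getD_eq_getElem g [] hk]; exact hm
      rw [List.getElem?_eq_none_iff.mpr (by omega), List.getElem?_eq_none_iff.mpr (by omega)]
      split <;> rfl
  · rw [List.getElem?_eq_none_iff.mpr (by omega), hB, List.getElem?_eq_none_iff.mpr (by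
      rw [List.length_map, PySem.List.length_pyRange_one]; simp; omega)]

-- ===== VERDICT (by name: the statement is the Claim_ definition above) =====
theorem draw_diag_py_spec : Claim_equal_draw_diag_py := by
  intro g bg _ hpre
  unfold Spec_draw_diag_py
  exact pv_final g bg hpre.1 hpre.2
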